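-- pv_equiv track=rewrite | github.com/21jagerard/COSC_001 | EXAM_4/Problem4.py | func
-- ===== SOURCE A (Python) =====
-- def func(s1, s2, k, i=0, count=0):
--     if i <= min(len(s1), len(s2)) - 1:
--         if s1[i] == s2[i]:
--             count += 1
--         return func(s1, s2, k, i + 1, count)
--     elif count != k:
--         return False
--     return True
-- ===== SOURCE B (Python) =====
-- def func(s1, s2, k, i=0, count=0):
--     n = min(len(s1), len(s2))
--     total = count + sum(1 for j in range(i, n) if s1[j] == s2[j])
--     return total == k
-- ===== Notes on version B (the rewrite author's own statement) =====
-- stated objective: simpler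
-- what changed: Replaces the tail recursion with a single iterative pass: add up the position matches over range(i, min(len(s1), len(s2))) seeded with count, and return the comparison total == k directly.
import Mathlib
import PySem

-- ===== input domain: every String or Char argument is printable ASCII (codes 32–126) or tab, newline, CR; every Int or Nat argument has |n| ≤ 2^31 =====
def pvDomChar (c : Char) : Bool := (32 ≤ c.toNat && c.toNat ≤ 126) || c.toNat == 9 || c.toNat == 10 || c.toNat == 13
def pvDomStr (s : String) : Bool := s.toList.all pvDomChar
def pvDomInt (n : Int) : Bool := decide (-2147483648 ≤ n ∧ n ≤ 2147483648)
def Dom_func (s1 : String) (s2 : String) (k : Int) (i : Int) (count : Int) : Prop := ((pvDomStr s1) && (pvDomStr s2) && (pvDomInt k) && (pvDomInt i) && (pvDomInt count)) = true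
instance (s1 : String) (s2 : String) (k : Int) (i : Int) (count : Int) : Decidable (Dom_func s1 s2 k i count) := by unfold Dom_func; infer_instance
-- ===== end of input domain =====

-- B replaces A's tail recursion by one iterative pass (sum of matches over the index range, compared to k); same return value, no speed claim.

-- ===== PORT A =====
-- literal transliteration of A's tail recursion; s1[i]/s2[i] via PySem.Str.pyGet?
def func (s1 : String) (s2 : String) (k : Int) (i : Int) (count : Int) : Bool :=
  if h : i ≤ min (PySem.Str.len s1) (PySem.Str.len s2) - 1 then
    let count' := if PySem.Str.pyGet? s1 i = PySem.Str.pyGet? s2 i then count + 1 else count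
    func s1 s2 k (i + 1) count'
  else if count ≠ k then false
  else true
termination_by (min (PySem.Str.len s1) (PySem.Str.len s2) - i).toNat
decreasing_by omega

-- ===== PORT B =====
-- transliteration of Source B: total = count + sum of matches over range(i, n); return total == k
def func_alt (s1 : String) (s2 : String) (k : Int) (i : Int) (count : Int) : Bool :=
  let n := min (PySem.Str.len s1) (PySem.Str.len s2)
  let total := count + ((PySem.List.pyRange i n 1).map
      (fun j => if PySem.Str.pyGet? s1 j = PySem.Str.pyGet? s2 j then (1 : Int) else 0)).sum
  total == k

-- ===== PRECONDITION & SPEC =====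
-- Pre_ excludes exactly the inputs where Python A raises IndexError: a start index i below
-- -min(len(s1), len(s2)), where the first access s1[i]/s2[i] is out of range.
def Pre_func (s1 : String) (s2 : String) (k : Int) (i : Int) (count : Int) : Prop :=
  -(min (PySem.Str.len s1) (PySem.Str.len s2)) ≤ i
instance (s1 : String) (s2 : String) (k : Int) (i : Int) (count : Int) : Decidable (Pre_func s1 s2 k i count) := by unfold Pre_func; infer_instance

def pvWitness_func : String × String × Int × Int × Int := ("abc", "axc", 2, 0, 0)

def Spec_func (s1 : String) (s2 : String) (k : Int) (i : Int) (count : Int) (out : Bool) : Prop := out = func_alt s1 s2 k i count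
instance (s1 : String) (s2 : String) (k : Int) (i : Int) (count : Int) (out : Bool) : Decidable (Spec_func s1 s2 k i count out) := by unfold Spec_func; infer_instance

-- ===== CLAIM (what is proved, stated in full; the proofs are below) =====
def Claim_equal_func : Prop := ∀ (s1 : String) (s2 : String) (k : Int) (i : Int) (count : Int), Dom_func s1 s2 k i count → Pre_func s1 s2 k i count → Spec_func s1 s2 k i count (func s1 s2 k i count)

-- ===== LEMMAS AND PROOFS =====

-- A's recursion computes "count + (number of matching positions from i on) = k".
theorem func_eq_decide (s1 s2 : String) (k i count : Int) :
    func s1 s2 k i count =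
      decide (count + ((PySem.List.pyRange i (min (PySem.Str.len s1) (PySem.Str.len s2)) 1).map
        (fun j => if PySem.Str.pyGet? s1 j = PySem.Str.pyGet? s2 j then (1 : Int) else 0)).sum = k) := by
  rw [func]
  split
  · rename_i h
    rw [func_eq_decide s1 s2 k (i + 1)]
    rw [PySem.List.pyRange_one_cons (by omega : i < min (PySem.Str.len s1) (PySem.Str.len s2))]
    simp only [List.map_cons, List.sum_cons]
    split <;> simp <;> constructor <;> intro <;> omega
  · rename_i h
    rw [PySem.List.pyRange_one_eq_nil (by omega : min (PySem.Str.len s1) (PySem.Str.len s2) ≤ i)]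
    simp only [List.map_nil, List.sum_nil, add_zero]
    by_cases hck : count = k <;> simp [hck]
termination_by (min (PySem.Str.len s1) (PySem.Str.len s2) - i).toNat
decreasing_by omega

theorem decide_eq_beq_int (a b : Int) : decide (a = b) = (a == b) := by
  by_cases h : a = b <;> simp [h]

-- ===== VERDICT (by name: the statement is the Claim_ definition above) =====
theorem func_spec : Claim_equal_func := by
  intro s1 s2 k i count _ _
  unfold Spec_func func_alt
  rw [func_eq_decide, decide_eq_beq_int]
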